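-- pv_equiv track=rewrite | github.com/Panashe1812/Work-Samples | toolSearch.py | tools
-- ===== SOURCE A (Python) =====
-- def tools(Tools, start, target):
--     n = len(Tools)
--     i = start
--     steps = 0
--
--     while i < n + start:
--         steps += 1
--         if target == Tools[i % n]:
--             return steps
--         i = i + 1
-- ===== SOURCE B (Python) =====
-- def tools(Tools, start, target):
--     n = len(Tools)
--     if n == 0:
--         return None
--     k = start % n
--     rot = Tools[k:] + Tools[:k]
--     if target in rot:
--         return rot.index(target) + 1
--     return None
-- ===== Notes on version B (the rewrite author's own statement) =====
-- stated objective: idiomatic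
-- what changed: Replaces the counting while-loop with per-step modular indexing by a rotate-then-search decomposition: build the circular visit order once as a rotated list and use the in operator and list.index.
import Mathlib
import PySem

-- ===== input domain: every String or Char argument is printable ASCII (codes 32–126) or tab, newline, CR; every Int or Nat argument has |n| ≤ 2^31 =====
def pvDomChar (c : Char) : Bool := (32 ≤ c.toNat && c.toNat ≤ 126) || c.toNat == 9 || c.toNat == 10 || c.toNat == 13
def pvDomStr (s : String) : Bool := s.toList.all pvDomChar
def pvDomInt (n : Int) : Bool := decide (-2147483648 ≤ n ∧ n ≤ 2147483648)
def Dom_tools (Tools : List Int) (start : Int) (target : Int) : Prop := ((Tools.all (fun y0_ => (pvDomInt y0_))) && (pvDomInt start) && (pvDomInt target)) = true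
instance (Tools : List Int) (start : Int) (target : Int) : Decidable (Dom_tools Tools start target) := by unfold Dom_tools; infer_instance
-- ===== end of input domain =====

-- B replaces A's counting while-loop (modular indexing each step) by a rotate-then-search
-- decomposition; same return value everywhere, no speed claim.

-- ===== PORT A =====
-- the while loop runs exactly n = len(Tools) iterations at most (i goes start .. n+start-1); fuel = n
def toolsLoop (Tools : List Int) (n : Int) (target : Int) : Nat → Int → Int → Option Int
  | 0, _, _ => none
  | fuel+1, i, steps =>
    let steps := steps + 1
    match PySem.List.pyGet? Tools (PySem.Int.mod i n) with
    | none => none   -- IndexError (unreachable: 0 ≤ i % n < n = len)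
    | some v => if target = v then some steps else toolsLoop Tools n target fuel (i+1) steps

def tools (Tools : List Int) (start : Int) (target : Int) : Option Int :=
  toolsLoop Tools (Tools.length : Int) target Tools.length start 0

-- ===== PORT B =====
def tools_alt (Tools : List Int) (start : Int) (target : Int) : Option Int :=
  let n : Int := Tools.length
  if Tools.length = 0 then none
  else
    let k := PySem.Int.mod start n
    let rot := PySem.List.slice Tools (some k) none ++ PySem.List.slice Tools none (some k)
    match PySem.List.index? rot target with
    | some j => some ((j : Int) + 1)
    | none => none

-- ===== PRECONDITION & SPEC =====
def Spec_tools (Tools : List Int) (start : Int) (target : Int) (out : Option Int) : Prop := out = tools_alt Tools start target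
instance (Tools : List Int) (start : Int) (target : Int) (out : Option Int) : Decidable (Spec_tools Tools start target out) := by unfold Spec_tools; infer_instance

-- ===== CLAIM (what is proved, stated in full; the proofs are below) =====
def Claim_equal_tools : Prop := ∀ (Tools : List Int) (start : Int) (target : Int), Dom_tools Tools start target → Spec_tools Tools start target (tools Tools start target)

-- ===== LEMMAS AND PROOFS =====

-- the list of values A's loop inspects, starting at index i, for f iterations
def visitL (Tools : List Int) (n : Int) : Nat → Int → List Int
  | 0, _ => []
  | f+1, i => Tools.getD (PySem.Int.mod i n).toNat 0 :: visitL Tools n f (i+1)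

theorem loop_eq_scan (Tools : List Int) (target : Int) (h : 0 < Tools.length) :
    ∀ (f : Nat) (i steps : Int),
      toolsLoop Tools (Tools.length : Int) target f i steps =
        (match PySem.List.index? (visitL Tools (Tools.length : Int) f i) target with
         | some j => some (steps + 1 + (j : Int))
         | none => none) := by
  intro f
  induction f with
  | zero => intro i steps; simp [toolsLoop, visitL, PySem.List.index?]
  | succ f ih =>
    intro i steps
    have hn : (0:Int) < (Tools.length : Int) := by exact_mod_cast h
    have hmod : 0 ≤ PySem.Int.mod i (Tools.length : Int) ∧
        PySem.Int.mod i (Tools.length : Int) < (Tools.length : Int) := by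
      rw [PySem.Int.mod_eq_emod_of_pos hn]
      exact ⟨Int.emod_nonneg _ (by positivity), Int.emod_lt_of_pos _ hn⟩
    have hlt : (PySem.Int.mod i (Tools.length : Int)).toNat < Tools.length := by omega
    have hget : PySem.List.pyGet? Tools (PySem.Int.mod i (Tools.length : Int)) =
        some (Tools.getD (PySem.Int.mod i (Tools.length : Int)).toNat 0) := by
      have hcast : PySem.Int.mod i (Tools.length : Int) =
          (((PySem.Int.mod i (Tools.length : Int)).toNat : Nat) : Int) := by omega
      rw [hcast, PySem.List.pyGet?_natCast, Int.toNat_natCast,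
        List.getElem?_eq_getElem hlt, List.getD_eq_getElem Tools 0 hlt]
    rw [show visitL Tools (Tools.length : Int) (f+1) i =
        Tools.getD (PySem.Int.mod i (Tools.length : Int)).toNat 0 ::
          visitL Tools (Tools.length : Int) f (i+1) from rfl]
    by_cases hv : target = Tools.getD (PySem.Int.mod i (Tools.length : Int)).toNat 0
    · rw [show toolsLoop Tools (Tools.length : Int) target (f+1) i steps =
          (match PySem.List.pyGet? Tools (PySem.Int.mod i (Tools.length : Int)) with
           | none => none
           | some v => if target = v then some (steps+1)
             else toolsLoop Tools (Tools.length : Int) target f (i+1) (steps+1)) from rfl,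
        hget]
      simp only [if_pos hv]
      rw [← hv, PySem.List.index?_cons_self]
      simp
    · rw [show toolsLoop Tools (Tools.length : Int) target (f+1) i steps =
          (match PySem.List.pyGet? Tools (PySem.Int.mod i (Tools.length : Int)) with
           | none => none
           | some v => if target = v then some (steps+1)
             else toolsLoop Tools (Tools.length : Int) target f (i+1) (steps+1)) from rfl,
        hget]
      simp only [if_neg hv]
      rw [ih (i+1) (steps+1),
        PySem.List.index?_cons_of_ne _ (fun h' => hv h'.symm)]
      cases hidx : PySem.List.index? (visitL Tools (Tools.length : Int) f (i+1)) target with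
      | none => simp
      | some j =>
        simp only [Option.map_some]
        congr 1
        push_cast
        omega

@[simp] theorem visitL_length (Tools : List Int) (n : Int) :
    ∀ (f : Nat) (i : Int), (visitL Tools n f i).length = f := by
  intro f
  induction f with
  | zero => intro i; rfl
  | succ f ih => intro i; simp [visitL, ih]

theorem visitL_getElem (Tools : List Int) (n : Int) :
    ∀ (f : Nat) (i : Int) (j : Nat) (hj : j < f),
      (visitL Tools n f i)[j]'(by simp [hj]) =
        Tools.getD (PySem.Int.mod (i + (j : Int)) n).toNat 0 := by
  intro f
  induction f with
  | zero => intro i j hj; omega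
  | succ f ih =>
    intro i j hj
    cases j with
    | zero => simp [visitL]
    | succ j =>
      have := ih (i+1) j (by omega)
      simp only [visitL, List.getElem_cons_succ]
      rw [this]
      congr 2
      push_cast
      ring

theorem visitL_eq_rotate (Tools : List Int) (start : Int) (h : 0 < Tools.length) :
    visitL Tools (Tools.length : Int) Tools.length start =
      Tools.rotate (PySem.Int.mod start (Tools.length : Int)).toNat := by
  have hn : (0:Int) < (Tools.length : Int) := by exact_mod_cast h
  have hk : PySem.Int.mod start (Tools.length : Int) = start % (Tools.length : Int) :=
    PySem.Int.mod_eq_emod_of_pos hn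
  have hk0 : 0 ≤ start % (Tools.length : Int) := Int.emod_nonneg _ (by positivity)
  have hkl : start % (Tools.length : Int) < (Tools.length : Int) := Int.emod_lt_of_pos _ hn
  apply List.ext_getElem
  · simp [List.length_rotate]
  · intro j hj1 hj2
    have hjf : j < Tools.length := by simpa using hj1
    rw [visitL_getElem Tools (Tools.length : Int) Tools.length start j hjf]
    rw [List.getElem_rotate]
    have hmlt : (PySem.Int.mod (start + (j:Int)) (Tools.length : Int)).toNat < Tools.length := by
      rw [PySem.Int.mod_eq_emod_of_pos hn]
      have := Int.emod_nonneg (start + (j:Int)) (show (Tools.length:Int) ≠ 0 by positivity)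
      have := Int.emod_lt_of_pos (start + (j:Int)) hn
      omega
    rw [← List.getD_eq_getElem Tools 0 (Nat.mod_lt _ h)]
    have hIdx : (PySem.Int.mod (start + (j:Int)) (Tools.length : Int)).toNat =
        (j + (PySem.Int.mod start (Tools.length : Int)).toNat) % Tools.length := by
      rw [PySem.Int.mod_eq_emod_of_pos hn, hk]
      have h1 : (start + (j:Int)) % (Tools.length : Int)
          = (start % (Tools.length : Int) + (j:Int)) % (Tools.length : Int) := by
        conv_rhs => rw [Int.add_emod, Int.emod_eq_of_lt hk0 hkl]
        rw [Int.add_emod]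
      obtain ⟨m, hm⟩ : ∃ m : Nat, start % (Tools.length : Int) = (m : Int) :=
        ⟨(start % (Tools.length : Int)).toNat, by omega⟩
      rw [h1, hm, ← Int.natCast_add, ← Int.natCast_emod, Int.toNat_natCast,
        Int.toNat_natCast, Nat.add_comm m j]
    rw [hIdx]

theorem tools_eq_alt : ∀ (Tools : List Int) (start target : Int),
    tools Tools start target = tools_alt Tools start target := by
  intro Tools start target
  by_cases h : Tools.length = 0
  · cases Tools with
    | nil => simp [tools, tools_alt, toolsLoop]
    | cons a l => simp at h
  · have hpos : 0 < Tools.length := Nat.pos_of_ne_zero h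
    have hn : (0:Int) < (Tools.length : Int) := by exact_mod_cast hpos
    have hk0 : 0 ≤ PySem.Int.mod start (Tools.length : Int) := by
      rw [PySem.Int.mod_eq_emod_of_pos hn]
      exact Int.emod_nonneg _ (by positivity)
    have hklt : (PySem.Int.mod start (Tools.length : Int)).toNat ≤ Tools.length := by
      have : PySem.Int.mod start (Tools.length : Int) < (Tools.length : Int) := by
        rw [PySem.Int.mod_eq_emod_of_pos hn]
        exact Int.emod_lt_of_pos _ hn
      omega
    unfold tools tools_alt
    rw [loop_eq_scan Tools target hpos, visitL_eq_rotate Tools start hpos]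
    simp only [if_neg h]
    rw [PySem.List.slice_from _ hk0, PySem.List.slice_to _ hk0]
    rw [← List.rotate_eq_drop_append_take hklt]
    cases hidx : PySem.List.index?
        (Tools.rotate (PySem.Int.mod start (Tools.length : Int)).toNat) target with
    | none => simp
    | some j =>
      simp only [hidx]
      congr 1
      omega

-- ===== VERDICT (by name: the statement is the Claim_ definition above) =====
theorem tools_spec : Claim_equal_tools := by
  intro Tools start target _
  exact tools_eq_alt Tools start target
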